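-- pv_equiv track=rewrite | github.com/MrBrantCode/unitest_baseline | mut_generate/mist_train_cf/cf_43349/solution.py | calculate_sums_and_parity
-- ===== SOURCE A (Python) =====
-- def calculate_sums_and_parity(input_nums):
--     """
--     Calculate the sum of digits in each integer and the sum of even and odd digits.
--
--     Args:
--     input_nums (list): A list of three integers, each with six digits.
--
--     Returns:
--     tuple: A tuple containing a list of sums of the digits in each integer and a list of tuples,
--            where each tuple contains the sum of even digits and the sum of odd digits in the corresponding integer.
--     """
--     sums = []
--     parity = []
--     for num in input_nums:
--         str_num = str(num)
--         sum_num = 0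
--         even = 0
--         odd = 0
--         for ch in str_num:
--             n = int(ch)
--             sum_num += n
--             if n % 2 == 0:
--                 even += n
--             else:
--                 odd += n
--         sums.append(sum_num)
--         parity.append((even, odd))
--     return sums, parity
-- ===== SOURCE B (Python) =====
-- def calculate_sums_and_parity(input_nums):
--     sums = []
--     parity = []
--     for num in input_nums:
--         even = 0
--         odd = 0
--         n = num
--         while n > 0:
--             n, d = divmod(n, 10)
--             if d % 2 == 0:
--                 even += d
--             else:
--                 odd += d
--         sums.append(even + odd)
--         parity.append((even, odd))
--     return sums, parity
-- ===== Notes on version B (the rewrite author's own statement) =====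
-- stated objective: alternative
-- what changed: B extracts digits arithmetically with divmod(n, 10) instead of converting each number to a string and parsing every character back with int(), and derives the total digit sum as even + odd instead of accumulating it separately.
import Mathlib
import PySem

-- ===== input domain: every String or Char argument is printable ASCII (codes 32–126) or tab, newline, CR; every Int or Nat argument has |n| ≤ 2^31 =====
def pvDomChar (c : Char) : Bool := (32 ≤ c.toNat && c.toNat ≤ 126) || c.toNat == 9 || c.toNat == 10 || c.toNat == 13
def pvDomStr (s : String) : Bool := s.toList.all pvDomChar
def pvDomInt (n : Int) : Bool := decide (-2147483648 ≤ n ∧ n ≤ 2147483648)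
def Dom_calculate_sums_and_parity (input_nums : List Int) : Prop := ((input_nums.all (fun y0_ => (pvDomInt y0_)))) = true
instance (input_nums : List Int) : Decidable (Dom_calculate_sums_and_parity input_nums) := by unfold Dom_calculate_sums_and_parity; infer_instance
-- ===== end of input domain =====

-- B replaces A's str()/int() round-trip per number by arithmetic digit extraction with divmod
-- and derives the digit sum as even + odd (objective: alternative; same cost).
-- Pre_ excludes lists containing a negative number: there A raises ValueError (int('-')).


-- ===== PORT A =====
-- literal port of A: str(num), then for each character ch: n = int(ch); sum_num += n;
-- even/odd updated by n % 2.  int(ch) raises ValueError on '-' (negative num): those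
-- inputs are excluded by Pre_, so the .getD 0 default is never reached there.
def calculate_sums_and_parity (input_nums : List Int) : List Int × (List (Int × Int)) :=
  input_nums.foldl (fun acc num =>
    let str_num := PySem.Int.toChars num
    let r := str_num.foldl (fun (st : Int × Int × Int) ch =>
      let n := (PySem.Int.ofStr? (String.ofList [ch])).getD 0
      let eo := if PySem.Int.mod n 2 == 0 then (st.2.1 + n, st.2.2) else (st.2.1, st.2.2 + n)
      (st.1 + n, eo.1, eo.2)) (0, 0, 0)
    (acc.1 ++ [r.1], acc.2 ++ [(r.2.1, r.2.2)])) ([], [])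

-- ===== PORT B =====
-- B's while loop: while n > 0: n, d = divmod(n, 10); add d to even or odd by parity.
def pvDigitLoop (n even odd : Int) : Int × Int :=
  if h : 0 < n then
    let q := PySem.Int.floordiv n 10
    let d := PySem.Int.mod n 10
    if PySem.Int.mod d 2 == 0 then pvDigitLoop q (even + d) odd
    else pvDigitLoop q even (odd + d)
  else (even, odd)
termination_by n.toNat
decreasing_by
  all_goals
    simp only [PySem.Int.floordiv_eq_ediv_of_pos (by norm_num : (0:Int) < 10)]
    omega

def calculate_sums_and_parity_alt (input_nums : List Int) : List Int × (List (Int × Int)) :=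
  input_nums.foldl (fun acc num =>
    let eo := pvDigitLoop num 0 0
    (acc.1 ++ [eo.1 + eo.2], acc.2 ++ [eo])) ([], [])

-- ===== PRECONDITION & SPEC =====
-- A raises ValueError on any negative number (int('-')); Pre_ excludes exactly those inputs.
def Pre_calculate_sums_and_parity (input_nums : List Int) : Prop :=
  ∀ x ∈ input_nums, 0 ≤ x
instance (input_nums : List Int) : Decidable (Pre_calculate_sums_and_parity input_nums) := by
  unfold Pre_calculate_sums_and_parity; infer_instance

def pvWitness_calculate_sums_and_parity : List Int := [123456, 0, 42]

def Spec_calculate_sums_and_parity (input_nums : List Int) (out : List Int × (List (Int × Int))) : Prop := out = calculate_sums_and_parity_alt input_nums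
instance (input_nums : List Int) (out : List Int × (List (Int × Int))) : Decidable (Spec_calculate_sums_and_parity input_nums out) := by unfold Spec_calculate_sums_and_parity; infer_instance

-- ===== CLAIM (what is proved, stated in full; the proofs are below) =====
def Claim_equal_calculate_sums_and_parity : Prop := ∀ (input_nums : List Int), Dom_calculate_sums_and_parity input_nums → Pre_calculate_sums_and_parity input_nums → Spec_calculate_sums_and_parity input_nums (calculate_sums_and_parity input_nums)

-- ===== LEMMAS AND PROOFS =====

-- even/odd digit sums of a natural number, the common reference value of both ports
def pvEoSum (m : Nat) : Int × Int :=
  if h : m = 0 then (0, 0)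
  else
    let d : Int := (m % 10 : Nat)
    let p := pvEoSum (m / 10)
    if m % 10 % 2 = 0 then (p.1 + d, p.2) else (p.1, p.2 + d)
decreasing_by exact Nat.div_lt_self (Nat.pos_of_ne_zero h) (by norm_num)

lemma pvEoSum_zero : pvEoSum 0 = (0, 0) := by rw [pvEoSum]; rfl

-- int(str of one digit char) evaluates to that digit
lemma pvChVal : ∀ d < 10, (PySem.Int.ofStr? (String.ofList [Nat.digitChar d])).getD 0 = (d : Int) := by
  decide

lemma pvBLoop_eq : ∀ (m : Nat) (e o : Int),
    pvDigitLoop (m : Int) e o = (e + (pvEoSum m).1, o + (pvEoSum m).2) := by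
  intro m
  induction m using Nat.strong_induction_on with
  | _ m ih =>
    intro e o
    rw [pvDigitLoop]
    by_cases hm : m = 0
    · subst hm; simp [pvEoSum]
    · have hpos : (0 : Int) < (m : Int) := by exact_mod_cast Nat.pos_of_ne_zero hm
      rw [dif_pos hpos]
      have hq : PySem.Int.floordiv (m : Int) 10 = ((m / 10 : Nat) : Int) := by
        rw [PySem.Int.floordiv_eq_ediv_of_pos (by norm_num : (0:Int) < 10)]
        omega
      have hd : PySem.Int.mod (m : Int) 10 = ((m % 10 : Nat) : Int) := by
        rw [PySem.Int.mod_eq_emod_of_pos (by norm_num : (0:Int) < 10)]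
        omega
      have hdiv : m / 10 < m := Nat.div_lt_self (Nat.pos_of_ne_zero hm) (by norm_num)
      simp only [hq, hd, PySem.Int.mod_eq_emod_of_pos (by norm_num : (0:Int) < 2)]
      conv_rhs => rw [pvEoSum]
      rw [dif_neg hm]
      by_cases hpar : m % 10 % 2 = 0
      · have hc : ((((m % 10 : Nat) : Int) % 2 == 0) = true) := by simp; omega
        simp only [hc, if_pos hpar, if_true, ih _ hdiv, Prod.mk.injEq]
        and_intros <;> first | trivial | linear_combination
      · have hc : ((((m % 10 : Nat) : Int) % 2 == 0) = false) := by simp; omega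
        simp only [hc, if_neg hpar, Bool.false_eq_true, if_false, ih _ hdiv, Prod.mk.injEq]
        and_intros <;> first | trivial | linear_combination

lemma pvAFold_eq : ∀ (m : Nat) (s e o : Int),
    (Nat.toDigits 10 m).foldl (fun (st : Int × Int × Int) ch =>
      let n := (PySem.Int.ofStr? (String.ofList [ch])).getD 0
      let eo := if PySem.Int.mod n 2 == 0 then (st.2.1 + n, st.2.2) else (st.2.1, st.2.2 + n)
      (st.1 + n, eo.1, eo.2)) (s, e, o)
    = (s + (pvEoSum m).1 + (pvEoSum m).2, e + (pvEoSum m).1, o + (pvEoSum m).2) := by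
  intro m
  induction m using Nat.strong_induction_on with
  | _ m ih =>
    intro s e o
    by_cases h10 : m < 10
    · rw [Nat.toDigits_of_lt_base h10, List.foldl_cons, List.foldl_nil]
      by_cases hm : m = 0
      · subst hm
        simp only [pvChVal 0 (by norm_num), pvEoSum_zero,
          PySem.Int.mod_eq_emod_of_pos (by norm_num : (0:Int) < 2)]
        norm_num
      · simp only [pvChVal m h10,
          PySem.Int.mod_eq_emod_of_pos (by norm_num : (0:Int) < 2)]
        conv_rhs => rw [pvEoSum]
        rw [dif_neg hm]
        rw [Nat.div_eq_of_lt h10, Nat.mod_eq_of_lt h10]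
        by_cases hpar : m % 2 = 0
        · have hc : (((m : Nat) : Int) % 2 == 0) = true := by simp; omega
          simp only [hc, if_pos hpar, if_true, pvEoSum_zero, Prod.mk.injEq]
          and_intros <;> first | trivial | linear_combination
        · have hc : (((m : Nat) : Int) % 2 == 0) = false := by simp; omega
          simp only [hc, if_neg hpar, Bool.false_eq_true, if_false, pvEoSum_zero, Prod.mk.injEq]
          and_intros <;> first | trivial | linear_combination
    · have hdiv : m / 10 < m := Nat.div_lt_self (by omega) (by norm_num)
      rw [Nat.toDigits_eq_if (by norm_num : 1 < 10), if_neg h10, List.foldl_append,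
        ih _ hdiv, List.foldl_cons, List.foldl_nil]
      simp only [pvChVal (m % 10) (Nat.mod_lt _ (by norm_num)),
        PySem.Int.mod_eq_emod_of_pos (by norm_num : (0:Int) < 2)]
      conv_rhs => rw [pvEoSum]
      rw [dif_neg (by omega : ¬ m = 0)]
      by_cases hpar : m % 10 % 2 = 0
      · have hc : (((m % 10 : Nat) : Int) % 2 == 0) = true := by simp; omega
        simp only [hc, if_pos hpar, if_true, Prod.mk.injEq]
        and_intros <;> first | trivial | linear_combination
      · have hc : (((m % 10 : Nat) : Int) % 2 == 0) = false := by simp; omega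
        simp only [hc, if_neg hpar, Bool.false_eq_true, if_false, Prod.mk.injEq]
        and_intros <;> first | trivial | linear_combination

-- ===== VERDICT (by name: the statement is the Claim_ definition above) =====
theorem calculate_sums_and_parity_spec : Claim_equal_calculate_sums_and_parity := by
  intro input_nums _hdom hpre
  unfold Spec_calculate_sums_and_parity
  unfold calculate_sums_and_parity calculate_sums_and_parity_alt
  apply PySem.List.foldl_congr_mem
  intro acc num hmem
  have hnn : 0 ≤ num := hpre num hmem
  have hchars : PySem.Int.toChars num = Nat.toDigits 10 num.toNat := by
    unfold PySem.Int.toChars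
    rw [if_neg (by omega)]
  have hcast : ((num.toNat : Nat) : Int) = num := Int.toNat_of_nonneg hnn
  have hB := pvBLoop_eq num.toNat 0 0
  rw [hcast] at hB
  simp only [hchars]
  rw [pvAFold_eq num.toNat 0 0 0, hB]
  simp
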